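-- pv_equiv track=rewrite | github.com/chenhh/Uva | uva_336_graph.py | BFS
-- ===== SOURCE A (Python) =====
-- from collections import deque
--
-- def BFS(graph, n_node, start, ttl):
--     """ the graph is a dict of list """
--     visited = {k: False for k in graph.keys()}
--     depth = {k: -1 for k in graph.keys()}
--     parents = {k: -1 for k in graph.keys()}
--     # (parent, node)
--     queue = deque([(start, start), ])
--
--     while queue:
--         parent, node = queue.popleft()
--         if not visited[node]:
--             visited[node] = True
--             parents[node] = parent
--             if depth[parent] >= ttl:
--                 break
--             depth[node] = depth[parent] + 1
--
--             for child in graph[node]: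
--                 if not visited[child]:
--                     queue.append((node, child))
--
--     return (sum(1 for _, v in depth.items() if v == -1))
-- ===== SOURCE B (Python) =====
-- def BFS(graph, n_node, start, ttl):
--     """Level-synchronous BFS: count nodes of the graph not reached within ttl levels."""
--     seen = {start}
--     frontier = [start]
--     reached = 0
--     level = 0
--     while frontier and level <= ttl:
--         reached += len(frontier)
--         nxt = []
--         for node in frontier:
--             for child in graph[node]:
--                 if child not in seen:
--                     seen.add(child)
--                     nxt.append(child)
--         frontier = nxt
--         level += 1
--     return len(graph) - reached
-- ===== Notes on version B (the rewrite author's own statement) =====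
-- stated objective: alternative
-- what changed: Replaces the deque of (parent,node) pairs with visited/depth/parents dicts and a final dict scan by a level-synchronous BFS that keeps only a seen-set and the current frontier list, counts reached nodes per level, and stops after level ttl instead of breaking on a popped node's parent depth.
-- outside the precondition, e.g. on BFS({1: [2], 2: [9]}, 2, 1, 0): A returns 1, B returns 1
import Mathlib
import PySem

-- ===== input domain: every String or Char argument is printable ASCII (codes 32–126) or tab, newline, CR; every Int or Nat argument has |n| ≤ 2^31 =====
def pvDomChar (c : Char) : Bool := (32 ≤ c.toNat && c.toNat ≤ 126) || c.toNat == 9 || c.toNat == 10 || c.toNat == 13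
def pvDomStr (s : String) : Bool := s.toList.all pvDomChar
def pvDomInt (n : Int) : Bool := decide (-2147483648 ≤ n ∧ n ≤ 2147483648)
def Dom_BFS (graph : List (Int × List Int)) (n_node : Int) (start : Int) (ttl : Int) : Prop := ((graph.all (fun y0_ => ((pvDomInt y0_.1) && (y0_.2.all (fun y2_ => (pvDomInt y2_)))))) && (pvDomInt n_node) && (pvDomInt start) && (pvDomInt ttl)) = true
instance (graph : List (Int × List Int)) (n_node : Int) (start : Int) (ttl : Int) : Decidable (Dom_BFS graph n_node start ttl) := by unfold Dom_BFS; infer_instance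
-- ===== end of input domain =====

-- B re-implements A's pair-queue BFS (visited/depth/parents dicts, mark-at-pop, final dict scan)
-- as a level-synchronous BFS (seen-set marked at enqueue, frontier list per level, running count);
-- equal return values are proved on Pre_BFS; neither mutates its arguments.

-- ===== PORT A =====
-- while queue: pop (parent, node); mark, set parent, break past ttl, set depth, enqueue unvisited children.
-- Fuel recursion: the fuel passed by BFS is proved sufficient under Pre_BFS (pvMain below); where
-- Python raises KeyError (missing start / non-key child) the dict lookups are totalized with getD,
-- which Pre_BFS excludes.
def pvALoop (g : PySem.Dict Int (List Int)) (ttl : Int) :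
    Nat → PySem.Dict Int Bool → PySem.Dict Int Int → PySem.Dict Int Int → List (Int × Int) →
    PySem.Dict Int Int
  | 0, _, depth, _, _ => depth
  | _ + 1, _, depth, _, [] => depth
  | fuel + 1, visited, depth, parents, (parent, node) :: queue =>
    if visited.getD node false then pvALoop g ttl fuel visited depth parents queue
    else
      let visited' := visited.insert node true
      let parents' := parents.insert node parent
      if depth.getD parent (-1) ≥ ttl then depth
      else
        let depth' := depth.insert node (depth.getD parent (-1) + 1)
        let queue' := (g.getD node []).foldl
          (fun q c => if visited'.getD c false then q else q ++ [(node, c)]) queue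
        pvALoop g ttl fuel visited' depth' parents' queue'

def BFS (graph : List (Int × List Int)) (n_node : Int) (start : Int) (ttl : Int) : Int :=
  let g := PySem.Dict.ofList graph
  let visited := g.keys.foldl (fun d k => d.insert k false) PySem.Dict.empty
  let depth := g.keys.foldl (fun d k => d.insert k (-1 : Int)) PySem.Dict.empty
  let parents := g.keys.foldl (fun d k => d.insert k (-1 : Int)) PySem.Dict.empty
  let fuel := g.size + (g.values.map List.length).sum + 1
  let final := pvALoop g ttl fuel visited depth parents [(start, start)]
  final.items.foldl (fun s kv => if kv.2 = -1 then s + 1 else s) (0 : Int)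

-- ===== PORT B =====
-- inner body: if child not in seen: seen.add(child); nxt.append(child)
def pvBChild (acc : PySem.Set Int × List Int) (child : Int) : PySem.Set Int × List Int :=
  if acc.1.contains child then acc else (acc.1.add child, acc.2 ++ [child])

-- while frontier and level <= ttl: count the frontier, collect the next one.
def pvBOuter (g : PySem.Dict Int (List Int)) (ttl : Int) (level : Int) (seen : PySem.Set Int)
    (frontier : List Int) (reached : Int) : Int :=
  if frontier = [] ∨ ttl < level then reached
  else
    let step := frontier.foldl (fun acc node => (g.getD node []).foldl pvBChild acc) (seen, [])
    pvBOuter g ttl (level + 1) step.1 step.2 (reached + frontier.length)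
  termination_by (ttl + 1 - level).toNat
  decreasing_by simp only [not_or, not_lt] at *; omega

def BFS_alt (graph : List (Int × List Int)) (n_node : Int) (start : Int) (ttl : Int) : Int :=
  let g := PySem.Dict.ofList graph
  (g.size : Int) - pvBOuter g ttl 0 (PySem.Set.add PySem.Set.empty start) [start] 0

-- Reachability closure used by Pre_BFS: iterate "add all children" until the set is stable
-- (the iteration count suffices, see pvReach_fix below).
def pvGrow (graph : List (Int × List Int)) (s : List Int) : List Int :=
  PySem.List.dedup (s ++ s.flatMap (fun x => (PySem.Dict.ofList graph).getD x []))

def pvReachList (graph : List (Int × List Int)) (start : Int) : List Int :=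
  (pvGrow graph)^[graph.length + (graph.map (fun p => p.2.length)).sum + 2] [start]

-- ===== PRECONDITION & SPEC =====
-- Pre_BFS excludes the inputs where A raises KeyError: a start that is not a key, and (when
-- ttl ≥ 0) a node reachable from start whose adjacency list mentions a non-key — the condition
-- ignores the ttl cut-off, so it also (conservatively) excludes graphs whose only non-key
-- children sit deeper than ttl, on which A still returns.
def Pre_BFS (graph : List (Int × List Int)) (n_node : Int) (start : Int) (ttl : Int) : Prop :=
  start ∈ graph.map Prod.fst ∧
    (ttl < 0 ∨ ∀ x ∈ pvReachList graph start,
      ∀ c ∈ (PySem.Dict.ofList graph).getD x [], c ∈ graph.map Prod.fst)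
instance (graph : List (Int × List Int)) (n_node : Int) (start : Int) (ttl : Int) : Decidable (Pre_BFS graph n_node start ttl) := by unfold Pre_BFS; infer_instance

def pvWitness_BFS : (List (Int × List Int)) × Int × Int × Int := ([(1, [2]), (2, [])], 2, 1, 5)

def Spec_BFS (graph : List (Int × List Int)) (n_node : Int) (start : Int) (ttl : Int) (out : Int) : Prop := out = BFS_alt graph n_node start ttl
instance (graph : List (Int × List Int)) (n_node : Int) (start : Int) (ttl : Int) (out : Int) : Decidable (Spec_BFS graph n_node start ttl out) := by unfold Spec_BFS; infer_instance

-- ===== CLAIM (what is proved, stated in full; the proofs are below) =====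
def Claim_equal_BFS : Prop := ∀ (graph : List (Int × List Int)) (n_node : Int) (start : Int) (ttl : Int), Dom_BFS graph n_node start ttl → Pre_BFS graph n_node start ttl → Spec_BFS graph n_node start ttl (BFS graph n_node start ttl)

-- ===== LEMMAS AND PROOFS =====

-- `visited[x]`, as a predicate
def pvVis (V : PySem.Dict Int Bool) : Int → Bool := fun x => V.getD x false

def pvMark (V : Int → Bool) (c : Int) : Int → Bool := fun x => x == c || V x

def pvMarks (V : Int → Bool) (L : List Int) : Int → Bool := fun x => L.contains x || V x

-- "first occurrences of unvisited nodes": the queue entries A will actually process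
def pvFFU : List (Int × Int) → (Int → Bool) → List (Int × Int)
  | [], _ => []
  | (p, c) :: rest, V =>
      if V c then pvFFU rest V else (p, c) :: pvFFU rest (pvMark V c)

-- B's loop resumed in the middle of a level: finish the fold over rem, then continue after level d
def pvBResume (g : PySem.Dict Int (List Int)) (ttl d : Int) (S : PySem.Set Int)
    (rem nxt : List Int) (reached : Int) : Int :=
  let step := rem.foldl (fun acc node => (g.getD node []).foldl pvBChild acc) (S, nxt)
  pvBOuter g ttl (d + 1) step.1 step.2 reached

-- number of keys whose depth is still -1
def pvDCount (g : PySem.Dict Int (List Int)) (D : PySem.Dict Int Int) : Nat :=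
  g.keys.countP (fun k => D.getD k (-1) == -1)

def pvWeight (g : PySem.Dict Int (List Int)) (V : Int → Bool) : Nat :=
  ((g.keys.filter (fun k => !V k)).map (fun k => 1 + (g.getD k []).length)).sum

def pvBound (g : PySem.Dict Int (List Int)) (V : Int → Bool) (Q : List (Int × Int)) : Nat :=
  Q.length + pvWeight g V

lemma pvContains_add (s : PySem.Set Int) (x y : Int) :
    (PySem.Set.add s x).contains y = (s.contains y || y == x) := by
  simp only [PySem.Set.add]
  split
  · next h =>
    by_cases hxy : y = x
    · subst hxy
      simpa using h
    · simp [hxy]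
  · simp [PySem.Set.contains, List.mem_append, Bool.beq_eq_decide_eq]

lemma pvMarks_nil (V : Int → Bool) : pvMarks V [] = V := by
  funext x; simp [pvMarks]

lemma pvMarks_cons (V : Int → Bool) (c : Int) (L : List Int) :
    pvMarks (pvMark V c) L = pvMarks V (c :: L) := by
  funext x
  simp only [pvMarks, pvMark, List.contains_cons]
  cases h1 : x == c <;> cases h2 : L.contains x <;> simp

lemma pvFFU_append (Q2 : List (Int × Int)) :
    ∀ (Q1 : List (Int × Int)) (V : Int → Bool),
      pvFFU (Q1 ++ Q2) V = pvFFU Q1 V ++ pvFFU Q2 (pvMarks V ((pvFFU Q1 V).map Prod.snd)) := by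
  intro Q1
  induction Q1 with
  | nil => intro V; simp [pvFFU, pvMarks_nil]
  | cons hd t ih =>
    obtain ⟨p, c⟩ := hd
    intro V
    cases hv : V c with
    | true => simp [pvFFU, hv, ih]
    | false => simp [pvFFU, hv, ih, pvMarks_cons]

lemma pvFFU_subset : ∀ (Q : List (Int × Int)) (V : Int → Bool) (pc : Int × Int),
    pc ∈ pvFFU Q V → pc ∈ Q := by
  intro Q
  induction Q with
  | nil => intro V pc h; simp [pvFFU] at h
  | cons hd t ih =>
    obtain ⟨p, c⟩ := hd
    intro V pc h
    cases hv : V c with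
    | true => simp only [pvFFU, hv, if_pos] at h; exact List.mem_cons_of_mem _ (ih _ _ h)
    | false =>
      simp only [pvFFU, hv, Bool.false_eq_true, if_neg, not_false_iff] at h
      rcases List.mem_cons.mp h with h | h
      · exact h ▸ List.mem_cons_self
      · exact List.mem_cons_of_mem _ (ih _ _ h)

lemma pvFFU_nil_all_visited : ∀ (Q : List (Int × Int)) (V : Int → Bool),
    pvFFU Q V = [] → ∀ pc ∈ Q, V pc.2 = true := by
  intro Q
  induction Q with
  | nil => intro V _ pc h; simp at h
  | cons hd t ih =>
    obtain ⟨p, c⟩ := hd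
    intro V h pc hpc
    cases hv : V c with
    | true =>
      simp only [pvFFU, hv, if_pos] at h
      rcases List.mem_cons.mp hpc with rfl | hm
      · exact hv
      · exact ih _ h _ hm
    | false => simp [pvFFU, hv] at h

lemma pvCountP_update {α : Type} [DecidableEq α] :
    ∀ (l : List α), l.Nodup → ∀ c ∈ l, ∀ (f g : α → Bool), f c = true → g c = false →
      (∀ x, x ≠ c → f x = g x) → l.countP f = l.countP g + 1 := by
  intro l
  induction l with
  | nil => intro _ c hc; cases hc
  | cons a t ih =>
    intro hnd c hc f g hf hg hfg
    rcases List.mem_cons.mp hc with rfl | hct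
    · have hnotin : c ∉ t := (List.nodup_cons.mp hnd).1
      have : t.countP f = t.countP g := by
        apply List.countP_congr
        intro x hx
        have : x ≠ c := fun h => hnotin (h ▸ hx)
        simp [hfg x this]
      simp [List.countP_cons, hf, hg, this]
    · have hac : a ≠ c := fun h => (List.nodup_cons.mp hnd).1 (h ▸ hct)
      have := ih (List.nodup_cons.mp hnd).2 c hct f g hf hg hfg
      simp [List.countP_cons, hfg a hac, this]
      omega

lemma pvSum_update :
    ∀ (l : List Int), l.Nodup → ∀ c ∈ l, ∀ (f g : Int → Bool) (h : Int → Nat), f c = true → g c = false →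
      (∀ x, x ≠ c → f x = g x) → ((l.filter f).map h).sum = h c + ((l.filter g).map h).sum := by
  intro l
  induction l with
  | nil => intro _ c hc; cases hc
  | cons a t ih =>
    intro hnd c hc f g h hf hg hfg
    rcases List.mem_cons.mp hc with rfl | hct
    · have hnotin : c ∉ t := (List.nodup_cons.mp hnd).1
      have : t.filter f = t.filter g := by
        apply List.filter_congr
        intro x hx
        exact hfg x (fun h => hnotin (h ▸ hx))
      simp [List.filter_cons, hf, hg, this]
    · have hac : a ≠ c := fun h => (List.nodup_cons.mp hnd).1 (h ▸ hct)
      have := ih (List.nodup_cons.mp hnd).2 c hct f g h hf hg hfg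
      by_cases ha : f a = true
      · simp [List.filter_cons, ha, ← hfg a hac, this]; omega
      · have ha' : f a = false := by simpa using ha
        simp [List.filter_cons, ha', ← hfg a hac, this]

lemma pvGetDFoldlConst {ν : Type} : ∀ (l : List Int) (d : PySem.Dict Int ν) (v : ν) (x : Int),
    d.getD x v = v → ((l.foldl (fun d k => d.insert k v) d).getD x v) = v := by
  intro l
  induction l with
  | nil => intro d v x h; simpa using h
  | cons k t ih =>
    intro d v x h
    simp only [List.foldl_cons]
    apply ih
    by_cases hxk : x = k
    · subst hxk; simp [PySem.Dict.getD_insert_self]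
    · rw [PySem.Dict.getD_insert_of_ne _ _ _ hxk]; exact h

lemma pvKeysFoldlConst {ν : Type} (l : List Int) (hl : l.Nodup) (v : ν) :
    (l.foldl (fun d k => d.insert k v) PySem.Dict.empty).keys = l := by
  have := PySem.Dict.keys_foldl_insert (ν := ν) l (fun _ _ => v) PySem.Dict.empty
  simp only at this
  rw [this]
  have : (PySem.Dict.empty : PySem.Dict Int ν).keys = [] := by simp [PySem.Dict.keys_empty]
  rw [this]
  show PySem.Set.update [] l = l
  have : PySem.Set.update [] l = PySem.Set.ofList l := rfl
  rw [this, PySem.Set.ofList_eq_self_of_nodup l hl]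

lemma pvVis_insert (V : PySem.Dict Int Bool) (c x : Int) :
    pvVis (V.insert c true) x = (x == c || pvVis V x) := by
  by_cases hxc : x = c
  · subst hxc; simp [pvVis, PySem.Dict.getD_insert_self]
  · simp [pvVis, PySem.Dict.getD_insert_of_ne _ _ _ hxc, hxc]

-- drain: every entry is a visited node or has a parent at depth ≥ ttl ⇒ the loop never writes depth
lemma pvDrain (g : PySem.Dict Int (List Int)) (ttl : Int) :
    ∀ (Q : List (Int × Int)) (fuel : Nat) (V : PySem.Dict Int Bool) (D P : PySem.Dict Int Int),
      (∀ pc ∈ Q, pvVis V pc.2 = true ∨ D.getD pc.1 (-1) ≥ ttl) → Q.length ≤ fuel →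
      pvALoop g ttl fuel V D P Q = D := by
  intro Q
  induction Q with
  | nil =>
    intro fuel V D P _ _
    cases fuel <;> simp [pvALoop]
  | cons hd t ih =>
    intro fuel V D P hcond hlen
    obtain ⟨p, c⟩ := hd
    cases fuel with
    | zero => simp at hlen
    | succ f =>
      show pvALoop g ttl (f + 1) V D P ((p, c) :: t) = D
      rw [pvALoop]
      cases hv : pvVis V c with
      | true =>
        simp only [pvVis] at hv
        rw [if_pos hv]
        exact ih f V D P (fun pc hpc => hcond pc (List.mem_cons_of_mem _ hpc)) (by simpa using hlen)
      | false =>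
        simp only [pvVis] at hv
        rw [if_neg (by simp [hv])]
        have : D.getD p (-1) ≥ ttl := by
          rcases hcond (p, c) List.mem_cons_self with h | h
          · simp only [pvVis] at h; rw [hv] at h; cases h
          · exact h
        simp [this]

-- B's inner child loop, against A's "append unvisited children, then keep first unvisited occurrences"
lemma pvChild (V' : Int → Bool) (par : Int) :
    ∀ (children : List Int) (S : PySem.Set Int) (U : Int → Bool) (nxt : List Int),
      (∀ x, S.contains x = U x) → (∀ x, V' x = true → U x = true) →
      (children.foldl pvBChild (S, nxt)).2
          = nxt ++ (pvFFU ((children.filter (fun ch => !V' ch)).map (fun ch => (par, ch))) U).map Prod.snd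
        ∧ ∀ x, (children.foldl pvBChild (S, nxt)).1.contains x
          = (U x || ((pvFFU ((children.filter (fun ch => !V' ch)).map (fun ch => (par, ch))) U).map Prod.snd).contains x) := by
  intro children
  induction children with
  | nil =>
    intro S U nxt hSU _
    exact ⟨by simp [pvFFU], fun x => by simpa [pvFFU] using hSU x⟩
  | cons ch rest ih =>
    intro S U nxt hSU hVU
    simp only [List.foldl_cons]
    cases hU : U ch with
    | true =>
      have hS : S.contains ch = true := by rw [hSU]; exact hU
      have hstep : pvBChild (S, nxt) ch = (S, nxt) := by simp only [pvBChild, hS, if_true]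
      rw [hstep]
      have hsame :
          ((ch :: rest).filter (fun ch => !V' ch)).map (fun ch => (par, ch)) = [] ++ ((rest.filter (fun ch => !V' ch)).map (fun ch => (par, ch))) ∨ True := Or.inr trivial
      by_cases hv : V' ch = true
      · have : (ch :: rest).filter (fun c => !V' c) = rest.filter (fun c => !V' c) := by
          simp [List.filter_cons, hv]
        rw [this]
        exact ih S U nxt hSU hVU
      · have hv' : V' ch = false := by simpa using hv
        have : (ch :: rest).filter (fun c => !V' c) = ch :: rest.filter (fun c => !V' c) := by
          simp [List.filter_cons, hv']
        rw [this]
        have hffu : pvFFU ((par, ch) :: (rest.filter (fun c => !V' c)).map (fun c => (par, c))) U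
            = pvFFU ((rest.filter (fun c => !V' c)).map (fun c => (par, c))) U := by
          simp [pvFFU, hU]
        simp only [List.map_cons, hffu]
        exact ih S U nxt hSU hVU
    | false =>
      have hS : S.contains ch = false := by rw [hSU]; exact hU
      have hv' : V' ch = false := by
        cases h : V' ch
        · rfl
        · exact absurd (hVU ch h) (by simp [hU])
      have hstep : pvBChild (S, nxt) ch = (S.add ch, nxt ++ [ch]) := by simp only [pvBChild, hS, Bool.false_eq_true, if_false]
      rw [hstep]
      have hfil : (ch :: rest).filter (fun c => !V' c) = ch :: rest.filter (fun c => !V' c) := by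
        simp [List.filter_cons, hv']
      rw [hfil]
      have hffu : pvFFU ((par, ch) :: (rest.filter (fun c => !V' c)).map (fun c => (par, c))) U
          = (par, ch) :: pvFFU ((rest.filter (fun c => !V' c)).map (fun c => (par, c))) (pvMark U ch) := by
        simp [pvFFU, hU]
      have hadd : ∀ x, (S.add ch).contains x = pvMark U ch x := by
        intro x; rw [pvContains_add, hSU x]; simp [pvMark, Bool.or_comm]
      have hVU' : ∀ x, V' x = true → pvMark U ch x = true := by
        intro x hx; simp [pvMark, hVU x hx]
      obtain ⟨h1, h2⟩ := ih (S.add ch) (pvMark U ch) (nxt ++ [ch]) hadd hVU'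
      constructor
      · simp only [List.map_cons, hffu, h1, List.map_cons]
        simp
      · intro x
        simp only [List.map_cons, hffu, h2 x, List.map_cons]
        simp only [pvMark, List.contains_cons]
        cases hx : x == ch <;> simp [hx, Bool.or_comm, Bool.or_assoc, Bool.or_left_comm]


lemma pvQueueAppend (V' : PySem.Dict Int Bool) (node : Int) (children : List Int)
    (q : List (Int × Int)) :
    children.foldl (fun q c => if V'.getD c false then q else q ++ [(node, c)]) q
      = q ++ (children.filter (fun c => !pvVis V' c)).map (fun c => (node, c)) := by
  have hfun : (fun (q : List (Int × Int)) c => if V'.getD c false then q else q ++ [(node, c)])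
      = (fun q c => if (!pvVis V' c) = true then q ++ [(node, c)] else q) := by
    funext q c
    simp only [pvVis]
    rcases Bool.eq_false_or_eq_true (V'.getD c false) with h | h <;> simp [h]
  rw [hfun, PySem.List.foldl_append_if]

lemma pvWeight_insert (g : PySem.Dict Int (List Int)) (hnd : g.keys.Nodup)
    (V : PySem.Dict Int Bool) (c : Int) (hc : c ∈ g.keys) (hv : pvVis V c = false) :
    pvWeight g (pvVis V) = (1 + (g.getD c []).length) + pvWeight g (pvVis (V.insert c true)) := by
  unfold pvWeight
  exact pvSum_update g.keys hnd c hc _ _ (fun k => 1 + (g.getD k []).length)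
    (by simp [hv]) (by simp [pvVis_insert]) (fun x hx => by simp [pvVis_insert, hx])

lemma pvDCount_insert (g : PySem.Dict Int (List Int)) (hnd : g.keys.Nodup)
    (D : PySem.Dict Int Int) (c : Int) (hc : c ∈ g.keys) (hD : D.getD c (-1) = -1)
    (v : Int) (hv : v ≠ -1) :
    pvDCount g D = pvDCount g (D.insert c v) + 1 := by
  unfold pvDCount
  exact pvCountP_update g.keys hnd c hc _ _ (by simp [hD])
    (by simp [PySem.Dict.getD_insert_self, hv])
    (fun x hx => by simp [PySem.Dict.getD_insert_of_ne _ _ _ hx])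

-- the main simulation: A's loop, mid-level, computes B's resumed count
lemma pvMain (g : PySem.Dict Int (List Int)) (ttl : Int)
    (hnd : g.keys.Nodup) (R : List Int)
    (hRk : ∀ x ∈ R, ∀ c ∈ g.getD x [], c ∈ g.keys)
    (hRc : ∀ x ∈ R, ∀ c ∈ g.getD x [], c ∈ R)
    (httl : 0 ≤ ttl) :
    ∀ (n fuel : Nat) (V : PySem.Dict Int Bool) (D P : PySem.Dict Int Int)
      (Q Q1 Q2 : List (Int × Int)) (d : Int) (rem nxt : List Int) (S : PySem.Set Int) (reached : Int),
      2 * fuel + (if rem = [] then 1 else 0) ≤ n →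
      pvBound g (pvVis V) Q ≤ fuel →
      Q = Q1 ++ Q2 →
      (∀ pc ∈ Q1, pvVis V pc.1 = true ∧ (pvVis V pc.2 = true ∨ D.getD pc.1 (-1) = d - 1)) →
      (∀ pc ∈ Q2, pvVis V pc.1 = true ∧ D.getD pc.1 (-1) = d) →
      rem = (pvFFU Q1 (pvVis V)).map Prod.snd →
      nxt = (pvFFU Q2 (pvMarks (pvVis V) rem)).map Prod.snd →
      (∀ x, S.contains x = (pvVis V x || rem.contains x || nxt.contains x)) →
      (∀ x ∈ rem, x ∈ g.keys ∧ x ∈ R) →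
      (∀ x ∈ nxt, x ∈ g.keys ∧ x ∈ R) →
      (∀ x, pvVis V x = true ↔ D.getD x (-1) ≠ -1) →
      D.keys = g.keys →
      0 ≤ d → d ≤ ttl →
      reached + (pvDCount g D : Int) = (g.size : Int) + rem.length →
      (pvALoop g ttl fuel V D P Q).keys = g.keys ∧
        (pvDCount g (pvALoop g ttl fuel V D P Q) : Int)
          = (g.size : Int) - pvBResume g ttl d S rem nxt reached := by
  intro n
  induction n with
  | zero =>
    intro fuel V D P Q Q1 Q2 d rem nxt S reached hmes hbound hsplit hC1 hC2 hrem hnxt hS hremk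
      hnxtk hC5 hDk hd0 hdttl hcount
    exfalso
    by_cases h : rem = []
    · simp [h] at hmes
    · have hf : fuel = 0 := by simp [h] at hmes; omega
      rw [hf] at hbound
      unfold pvBound at hbound
      have hQ : Q = [] := List.length_eq_zero_iff.mp (by omega)
      have hQ1 : Q1 = [] := (List.append_eq_nil_iff.mp (hQ ▸ hsplit.symm)).1
      exact h (by rw [hrem, hQ1]; rfl)
  | succ n ih =>
    intro fuel V D P Q Q1 Q2 d rem nxt S reached hmes hbound hsplit hC1 hC2 hrem hnxt hS hremk
      hnxtk hC5 hDk hd0 hdttl hcount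
    subst hsplit
    by_cases hremE : rem = []
    · subst hremE
      have hffu1 : pvFFU Q1 (pvVis V) = [] := List.map_eq_nil_iff.mp hrem.symm
      have hvisQ1 : ∀ pc ∈ Q1, pvVis V pc.2 = true := pvFFU_nil_all_visited _ _ hffu1
      rw [pvMarks_nil] at hnxt
      by_cases hnxtE : nxt = []
      · subst hnxtE
        have hffu2 : pvFFU Q2 (pvVis V) = [] := List.map_eq_nil_iff.mp hnxt.symm
        have hvisQ2 := pvFFU_nil_all_visited _ _ hffu2
        have hdrain : pvALoop g ttl fuel V D P (Q1 ++ Q2) = D := by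
          apply pvDrain
          · intro pc hpc
            rcases List.mem_append.mp hpc with h | h
            · exact Or.inl (hvisQ1 pc h)
            · exact Or.inl (hvisQ2 pc h)
          · unfold pvBound at hbound; omega
        rw [hdrain]
        refine ⟨hDk, ?_⟩
        have hres : pvBResume g ttl d S [] [] reached = reached := by
          unfold pvBResume
          simp only [List.foldl_nil]
          rw [pvBOuter]
          simp
        rw [hres]
        simp only [List.length_nil, Nat.cast_zero, add_zero] at hcount
        omega
      · by_cases hdt : d + 1 ≤ ttl
        · -- rebase to the next level
          have hrebase : pvBResume g ttl d S [] nxt reached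
              = pvBResume g ttl (d + 1) S nxt [] (reached + nxt.length) := by
            unfold pvBResume
            simp only [List.foldl_nil]
            rw [pvBOuter]
            rw [if_neg (by push_neg; exact ⟨hnxtE, by omega⟩)]
          rw [hrebase]
          apply ih fuel V D P (Q1 ++ Q2) (Q1 ++ Q2) [] (d + 1) nxt [] S (reached + nxt.length)
          · rw [if_neg hnxtE]
            simp at hmes
            omega
          · exact hbound
          · simp
          · intro pc hpc
            rcases List.mem_append.mp hpc with h | h
            · exact ⟨(hC1 pc h).1, Or.inl (hvisQ1 pc h)⟩
            · exact ⟨(hC2 pc h).1, Or.inr (by rw [(hC2 pc h).2]; ring)⟩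
          · intro pc hpc; cases hpc
          · rw [pvFFU_append, hffu1]
            simp only [List.nil_append, List.map_nil, pvMarks_nil]
            exact hnxt
          · rfl
          · intro x; rw [hS x]; simp
          · exact hnxtk
          · intro x hx; cases hx
          · exact hC5
          · exact hDk
          · omega
          · exact hdt
          · simp only [List.length_nil, Nat.cast_zero, add_zero] at hcount
            omega
        · -- d = ttl: A breaks on the first entry of the next level, B stops after level ttl
          have hdE : d = ttl := by omega
          have hdrain : pvALoop g ttl fuel V D P (Q1 ++ Q2) = D := by
            apply pvDrain
            · intro pc hpc
              rcases List.mem_append.mp hpc with h | h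
              · exact Or.inl (hvisQ1 pc h)
              · exact Or.inr (by rw [(hC2 pc h).2, hdE])
            · unfold pvBound at hbound; omega
          rw [hdrain]
          refine ⟨hDk, ?_⟩
          have hres : pvBResume g ttl d S [] nxt reached = reached := by
            unfold pvBResume
            simp only [List.foldl_nil]
            rw [pvBOuter, if_pos (Or.inr (by omega))]
          rw [hres]
          simp only [List.length_nil, Nat.cast_zero, add_zero] at hcount
          omega
    · -- the frontier is nonempty: A pops its queue head
      cases Q1 with
      | nil => exact absurd (by rw [hrem]; rfl) hremE
      | cons hd Q1' =>
      obtain ⟨p, c⟩ := hd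
      cases fuel with
      | zero =>
        exfalso
        unfold pvBound at hbound
        simp at hbound
      | succ f =>
      have hC1pc := hC1 (p, c) List.mem_cons_self
      simp only [List.cons_append]
      cases hvc : pvVis V c with
      | true =>
        -- visited duplicate: skip
        have hvc' : V.getD c false = true := hvc
        have hstep : pvALoop g ttl (f + 1) V D P ((p, c) :: (Q1' ++ Q2))
            = pvALoop g ttl f V D P (Q1' ++ Q2) := by
          rw [pvALoop, if_pos hvc']
        rw [hstep]
        apply ih f V D P (Q1' ++ Q2) Q1' Q2 d rem nxt S reached
        · simp only [hremE, if_neg] at hmes ⊢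
          omega
        · unfold pvBound at hbound ⊢
          simp only [List.length_cons, List.length_append] at hbound ⊢
          omega
        · rfl
        · intro pc hpc; exact hC1 pc (List.mem_cons_of_mem _ hpc)
        · exact hC2
        · rw [hrem]; simp [pvFFU, hvc]
        · exact hnxt
        · exact hS
        · exact hremk
        · exact hnxtk
        · exact hC5
        · exact hDk
        · exact hd0
        · exact hdttl
        · exact hcount
      | false =>
        -- first unvisited occurrence: A processes node c of level d
        have hvisp : pvVis V p = true := hC1pc.1
        have hdp : D.getD p (-1) = d - 1 := by
          rcases hC1pc.2 with h | h
          · rw [hvc] at h; cases h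
          · exact h
        obtain ⟨hck, hcR⟩ : c ∈ g.keys ∧ c ∈ R :=
          hremk c (by rw [hrem]; simp [pvFFU, hvc])
        have hffu1 : pvFFU ((p, c) :: Q1') (pvVis V) = (p, c) :: pvFFU Q1' (pvMark (pvVis V) c) := by
          simp [pvFFU, hvc]
        have hmark : pvMark (pvVis V) c = pvVis (V.insert c true) := by
          funext x; rw [pvVis_insert]; rfl
        have hremC : rem = c :: (pvFFU Q1' (pvVis (V.insert c true))).map Prod.snd := by
          rw [hrem, hffu1, hmark]; rfl
        set V' := V.insert c true with hV'
        set D' := D.insert c d with hD'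
        set rem0 := (pvFFU Q1' (pvVis V')).map Prod.snd with hrem0
        set children := g.getD c [] with hchildren
        set new := (children.filter (fun ch => !pvVis V' ch)).map (fun ch => (c, ch)) with hnew
        have hd1 : D.getD p (-1) + 1 = d := by rw [hdp]; ring
        have hnb : ¬ (D.getD p (-1) ≥ ttl) := by rw [hdp]; omega
        have hvc' : V.getD c false = false := hvc
        have hstep : pvALoop g ttl (f + 1) V D P ((p, c) :: (Q1' ++ Q2))
            = pvALoop g ttl f V' D' (P.insert c p) (Q1' ++ (Q2 ++ new)) := by
          rw [pvALoop, if_neg (by simp [hvc']), if_neg hnb]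
          rw [pvQueueAppend, hd1, ← List.append_assoc]
        rw [hstep]
        -- B side: one fold step over the frontier head c
        set W := pvMarks (pvVis V) rem with hW
        set U := pvMarks W nxt with hU
        have hSU : ∀ x, S.contains x = U x := by
          intro x
          rw [hS x]
          simp only [hU, hW, pvMarks]
          cases rem.contains x <;> cases nxt.contains x <;> cases pvVis V x <;> simp
        have hV'U : ∀ x, pvVis V' x = true → U x = true := by
          intro x hx
          rw [hV', pvVis_insert] at hx
          simp only [hU, hW, pvMarks]
          have hx' : (x == c) = true ∨ pvVis V x = true := by simpa using hx
          rcases hx' with h | h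
          · have : x = c := by simpa using h
            subst this
            rw [hremC]
            simp
          · simp [h]
        obtain ⟨hB2, hB1⟩ := pvChild (pvVis V') c children S U nxt hSU hV'U
        rw [← hnew] at hB2 hB1
        set delta := (pvFFU new U).map Prod.snd with hdelta
        set S2 := (children.foldl pvBChild (S, nxt)).1 with hS2
        have hpair : children.foldl pvBChild (S, nxt) = (S2, nxt ++ delta) := by
          rw [hS2]
          conv_lhs => rw [← Prod.mk.eta (p := children.foldl pvBChild (S, nxt))]
          rw [hB2]
        have hresume : pvBResume g ttl d S rem nxt reached
            = pvBResume g ttl d S2 rem0 (nxt ++ delta) reached := by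
          rw [hremC]
          unfold pvBResume
          simp only [List.foldl_cons]
          rw [← hchildren, hpair]
        rw [hresume]
        apply ih f V' D' (P.insert c p) (Q1' ++ (Q2 ++ new)) Q1' (Q2 ++ new) d rem0 (nxt ++ delta)
          S2 reached
        · have h01 : (if rem0 = [] then 1 else 0) ≤ 1 := by split <;> omega
          simp only [hremE, if_neg] at hmes
          omega
        · unfold pvBound at hbound ⊢
          have hnewlen : new.length ≤ children.length := by
            rw [hnew, List.length_map]
            exact List.length_filter_le _ _
          have hw := pvWeight_insert g hnd V c hck hvc
          rw [← hchildren, ← hV'] at hw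
          simp only [List.length_cons, List.length_append] at hbound ⊢
          omega
        · rfl
        · intro pc hpc
          have h0 := hC1 pc (List.mem_cons_of_mem _ hpc)
          have hne : pc.1 ≠ c := fun h => by rw [← h, h0.1] at hvc; cases hvc
          refine ⟨by rw [hV', pvVis_insert, h0.1]; simp, ?_⟩
          rcases h0.2 with h | h
          · exact Or.inl (by rw [hV', pvVis_insert, h]; simp)
          · exact Or.inr (by rw [hD', PySem.Dict.getD_insert_of_ne _ _ _ hne]; exact h)
        · intro pc hpc
          rcases List.mem_append.mp hpc with h | h
          · have h0 := hC2 pc h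
            have hne : pc.1 ≠ c := fun hh => by rw [← hh, h0.1] at hvc; cases hvc
            exact ⟨by rw [hV', pvVis_insert, h0.1]; simp,
              by rw [hD', PySem.Dict.getD_insert_of_ne _ _ _ hne]; exact h0.2⟩
          · rw [hnew] at h
            rcases List.mem_map.mp h with ⟨ch, _, rfl⟩
            exact ⟨by rw [hV', pvVis_insert]; simp, by rw [hD', PySem.Dict.getD_insert_self]⟩
        · rfl
        · -- next-frontier clause
          have hWeq : pvMarks (pvVis V') rem0 = W := by
            funext x
            rw [hW, hremC]
            simp only [pvMarks, hV', pvVis_insert, List.contains_cons]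
            cases x == c <;> cases (pvFFU Q1' (pvVis V')).map Prod.snd |>.contains x <;>
              cases pvVis V x <;> simp
          rw [hWeq, pvFFU_append, List.map_append, ← hnxt, ← hU, ← hdelta]
        · intro x
          rw [hB1 x]
          simp only [hU, hW, pvMarks, hremC, List.contains_cons, List.contains_append, hV',
            pvVis_insert, ← hrem0]
          cases x == c <;> cases rem0.contains x <;> cases pvVis V x <;> cases nxt.contains x <;>
            cases delta.contains x <;> simp
        · intro x hx
          exact hremk x (by rw [hremC]; exact List.mem_cons_of_mem _ hx)
        · intro x hx
          rcases List.mem_append.mp hx with h | h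
          · exact hnxtk x h
          · rw [hdelta] at h
            rcases List.mem_map.mp h with ⟨pc, hpc, rfl⟩
            have := pvFFU_subset _ _ _ hpc
            rcases List.mem_map.mp this with ⟨ch, hch, rfl⟩
            exact ⟨hRk c hcR ch (List.mem_of_mem_filter hch),
              hRc c hcR ch (List.mem_of_mem_filter hch)⟩
        · intro x
          by_cases hxc : x = c
          · subst hxc
            rw [hV', hD']
            constructor
            · intro _; rw [PySem.Dict.getD_insert_self]; omega
            · intro _; rw [pvVis_insert]; simp
          · rw [hV', hD', pvVis_insert, PySem.Dict.getD_insert_of_ne _ _ _ hxc]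
            have hbeq : (x == c) = false := by simp [hxc]
            rw [hbeq]
            simpa using hC5 x
        · rw [hD', PySem.Dict.keys_insert_of_contains _ _
            ((PySem.Dict.contains_iff_mem_keys D c).mpr (hDk ▸ hck))]
          exact hDk
        · exact hd0
        · exact hdttl
        · have hDc : D.getD c (-1) = -1 := by
            by_contra h
            rw [(hC5 c).mpr h] at hvc
            cases hvc
          have := pvDCount_insert g hnd D c hck hDc d (by omega)
          rw [← hD'] at this
          rw [hremC] at hcount
          simp only [List.length_cons, ← hrem0] at hcount
          push_cast at hcount ⊢
          omega


lemma pvSumOneAdd : ∀ (l : List Int) (h : Int → Nat),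
    (l.map (fun k => 1 + h k)).sum = l.length + (l.map h).sum := by
  intro l h
  induction l with
  | nil => simp
  | cons a t ih => simp [ih]; omega

lemma pvMemKeysOfList (graph : List (Int × List Int)) (x : Int) :
    x ∈ (PySem.Dict.ofList graph).keys ↔ x ∈ graph.map Prod.fst := by
  have hk : (PySem.Dict.ofList graph).keys
      = PySem.Set.update (PySem.Dict.empty : PySem.Dict Int (List Int)).keys (graph.map Prod.fst) := by
    exact PySem.Dict.keys_foldl_insert_key graph Prod.fst (fun _ p => p.2) PySem.Dict.empty
  rw [hk, PySem.Set.mem_update]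
  simp

lemma pvItemsFoldlSub : ∀ (l : List (Int × List Int)) (d : PySem.Dict Int (List Int))
    (kv : Int × List Int),
    kv ∈ (l.foldl (fun acc p => acc.insert p.1 p.2) d).items → kv ∈ d.items ∨ kv ∈ l := by
  intro l
  induction l with
  | nil => intro d kv h; exact Or.inl h
  | cons a t ih =>
    intro d kv h
    simp only [List.foldl_cons] at h
    rcases ih _ _ h with h | h
    · rcases (PySem.Dict.mem_items_insert _ _ _ _).mp h with h | h
      · exact Or.inr (by simp [h])
      · exact Or.inl h.1
    · exact Or.inr (List.mem_cons_of_mem _ h)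


def pvU (graph : List (Int × List Int)) (start : Int) : List Int :=
  start :: graph.flatMap (fun p => p.2)

lemma pvLenSub (s t : List Int) (h1 : s.Nodup) (h2 : s ⊆ t) : s.length ≤ t.length := by
  calc s.length = s.toFinset.card := (List.toFinset_card_of_nodup h1).symm
  _ ≤ t.toFinset.card := Finset.card_le_card
      (fun x hx => List.mem_toFinset.mpr (h2 (List.mem_toFinset.mp hx)))
  _ ≤ t.length := t.toFinset_card_le

lemma pvFoldlAddExt : ∀ (t : List Int) (b : PySem.Set Int),
    ∃ r, t.foldl PySem.Set.add b = b ++ r := by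
  intro t
  induction t with
  | nil => intro b; exact ⟨[], by simp⟩
  | cons a t ih =>
    intro b
    simp only [List.foldl_cons]
    by_cases h : b.contains a = true
    · have : PySem.Set.add b a = b := by simp only [PySem.Set.add, h, if_true]
      rw [this]
      exact ih b
    · have : PySem.Set.add b a = b ++ [a] := by
        simp only [PySem.Set.add]
        rw [if_neg h]
      rw [this]
      obtain ⟨r, hr⟩ := ih (b ++ [a])
      exact ⟨a :: r, by simp [hr]⟩

lemma pvDedupAppend (s t : List Int) (h : s.Nodup) :
    ∃ r, PySem.List.dedup (s ++ t) = s ++ r := by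
  rw [PySem.List.dedup_eq_ofList]
  have h1 : PySem.Set.ofList (s ++ t) = t.foldl PySem.Set.add (s.foldl PySem.Set.add []) := by
    show (s ++ t).foldl PySem.Set.add [] = _
    rw [List.foldl_append]
  have h2 : s.foldl PySem.Set.add [] = s := PySem.Set.ofList_eq_self_of_nodup s h
  rw [h1, h2]
  exact pvFoldlAddExt t s

lemma pvGrow_mem (graph : List (Int × List Int)) (s : List Int) (x : Int) (h : x ∈ s) :
    x ∈ pvGrow graph s := by
  unfold pvGrow
  rw [PySem.List.mem_dedup]
  exact List.mem_append_left _ h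

lemma pvGrow_nodup (graph : List (Int × List Int)) (s : List Int) : (pvGrow graph s).Nodup :=
  PySem.List.nodup_dedup _

lemma pvGrow_child (graph : List (Int × List Int)) (s : List Int) (x c : Int) (hx : x ∈ s)
    (hc : c ∈ (PySem.Dict.ofList graph).getD x []) : c ∈ pvGrow graph s := by
  unfold pvGrow
  rw [PySem.List.mem_dedup]
  exact List.mem_append_right _ (List.mem_flatMap.mpr ⟨x, hx, hc⟩)

lemma pvChildU (graph : List (Int × List Int)) (x c : Int)
    (hc : c ∈ (PySem.Dict.ofList graph).getD x []) : c ∈ graph.flatMap (fun p => p.2) := by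
  cases hq : (PySem.Dict.ofList graph).get? x with
  | none => rw [PySem.Dict.getD_eq_get?_getD, hq] at hc; cases hc
  | some adj =>
    rw [PySem.Dict.getD_eq_get?_getD, hq] at hc
    have hitem := PySem.Dict.mem_items_of_get?_eq_some (PySem.Dict.ofList graph) hq
    rcases pvItemsFoldlSub graph PySem.Dict.empty (x, adj) hitem with h0 | h0
    · cases h0
    · exact List.mem_flatMap.mpr ⟨(x, adj), h0, hc⟩

lemma pvIter_nodup (graph : List (Int × List Int)) (start : Int) :
    ∀ k, ((pvGrow graph)^[k] [start]).Nodup := by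
  intro k
  cases k with
  | zero => simp
  | succ k => rw [Function.iterate_succ_apply']; exact pvGrow_nodup _ _

lemma pvIter_subU (graph : List (Int × List Int)) (start : Int) :
    ∀ k, (pvGrow graph)^[k] [start] ⊆ pvU graph start := by
  intro k
  induction k with
  | zero =>
    intro x hx
    simp only [Function.iterate_zero, id_eq, List.mem_singleton] at hx
    subst hx
    exact List.mem_cons_self
  | succ k ih =>
    rw [Function.iterate_succ_apply']
    intro x hx
    unfold pvGrow at hx
    rw [PySem.List.mem_dedup] at hx
    rcases List.mem_append.mp hx with h | h
    · exact ih h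
    · rcases List.mem_flatMap.mp h with ⟨y, hy, hc⟩
      exact List.mem_cons_of_mem _ (pvChildU graph y x hc)

lemma pvReach_fix (graph : List (Int × List Int)) (start : Int) :
    pvGrow graph (pvReachList graph start) = pvReachList graph start := by
  set f := pvGrow graph with hf
  set N := graph.length + (graph.map (fun p => p.2.length)).sum + 2 with hN
  have hmain : ∀ M : Nat, (∀ j, j < M → f (f^[j] [start]) ≠ f^[j] [start]) →
      M + 1 ≤ (f^[M] [start]).length := by
    intro M
    induction M with
    | zero => intro _; simp
    | succ M ih =>
      intro h
      have hlen := ih (fun j hj => h j (Nat.lt_succ_of_lt hj))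
      obtain ⟨r, hr⟩ := pvDedupAppend (f^[M] [start])
        ((f^[M] [start]).flatMap (fun x => (PySem.Dict.ofList graph).getD x []))
        (pvIter_nodup graph start M)
      have hgrow : f (f^[M] [start]) = f^[M] [start] ++ r := hr
      have hrne : r ≠ [] := by
        intro hre
        exact h M (Nat.lt_succ_self M) (by rw [hgrow, hre, List.append_nil])
      rw [Function.iterate_succ_apply', hgrow, List.length_append]
      have : 1 ≤ r.length := List.length_pos_iff.mpr hrne
      omega
  have hUlen : (pvU graph start).length = 1 + (graph.map (fun p => p.2.length)).sum := by
    unfold pvU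
    simp [List.length_flatMap]
    omega
  have hex : ∃ j, j < N ∧ f (f^[j] [start]) = f^[j] [start] := by
    by_contra hcon
    push_neg at hcon
    have h1 := hmain N (fun j hj => hcon j hj)
    have h2 := pvLenSub _ _ (pvIter_nodup graph start N) (pvIter_subU graph start N)
    rw [← hf] at h2
    rw [hUlen] at h2
    omega
  obtain ⟨j, hj, hfix⟩ := hex
  have pers : ∀ k, f^[j + k] [start] = f^[j] [start] := by
    intro k
    induction k with
    | zero => rfl
    | succ k ih =>
      rw [show j + (k + 1) = (j + k) + 1 from rfl, Function.iterate_succ_apply', ih, hfix]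
  have hNj : f^[N] [start] = f^[j] [start] := by
    rw [show N = j + (N - j) from by omega]
    exact pers _
  show f (f^[N] [start]) = f^[N] [start]
  rw [hNj]
  exact hfix

lemma pvReach_start (graph : List (Int × List Int)) (start : Int) :
    start ∈ pvReachList graph start := by
  show start ∈ (pvGrow graph)^[_] [start]
  generalize (graph.length + (graph.map (fun p => p.2.length)).sum + 2) = k
  induction k with
  | zero => simp
  | succ k ih => rw [Function.iterate_succ_apply']; exact pvGrow_mem _ _ _ ih

lemma pvReach_closed (graph : List (Int × List Int)) (start x c : Int)
    (hx : x ∈ pvReachList graph start) (hc : c ∈ (PySem.Dict.ofList graph).getD x []) :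
    c ∈ pvReachList graph start := by
  have := pvGrow_child graph (pvReachList graph start) x c hx hc
  rwa [pvReach_fix] at this

lemma pvReturnCount (g : PySem.Dict Int (List Int)) (D : PySem.Dict Int Int)
    (hk : D.keys = g.keys) (hnd : g.keys.Nodup) :
    D.items.foldl (fun s kv => if kv.2 = -1 then s + 1 else s) (0 : Int) = (pvDCount g D : Int) := by
  have hfn : (fun (s : Int) (kv : Int × Int) => if kv.2 = -1 then s + 1 else s)
      = (fun s kv => if (kv.2 == -1) = true then s + 1 else s) := by
    funext s kv
    by_cases h : kv.2 = -1 <;> simp [h]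
  rw [hfn, PySem.List.foldl_count_if]
  rw [PySem.Dict.items_eq_map_keys D (hk ▸ hnd) (-1), List.countP_map, hk]
  have : ((fun (kv : Int × Int) => kv.2 == -1) ∘ fun k => (k, D.getD k (-1)))
      = fun k => D.getD k (-1) == -1 := rfl
  rw [this]
  simp [pvDCount]

lemma pvWeightInit (g : PySem.Dict Int (List Int)) (hnd : g.keys.Nodup)
    (V0 : PySem.Dict Int Bool) (hV0 : ∀ x, pvVis V0 x = false) :
    pvWeight g (pvVis V0) = g.size + (g.values.map List.length).sum := by
  unfold pvWeight
  rw [List.filter_eq_self.mpr (fun a _ => by simp [hV0])]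
  rw [pvSumOneAdd]
  have hvals : g.values = g.keys.map (fun k => g.getD k []) := PySem.Dict.values_eq_map_keys g hnd []
  rw [hvals, List.map_map]
  have hsize : g.size = g.keys.length := by
    simp [PySem.Dict.size, PySem.Dict.keys]
  rw [hsize]
  rfl

-- ===== VERDICT (by name: the statement is the Claim_ definition above) =====
theorem BFS_spec : Claim_equal_BFS := by
  intro graph n_node start ttl _ hpre
  obtain ⟨hstart, hrest⟩ := hpre
  unfold Spec_BFS BFS BFS_alt
  dsimp only
  set g := PySem.Dict.ofList graph with hg
  have hnd : g.keys.Nodup := PySem.Dict.nodup_keys_ofList graph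
  have hstartk : start ∈ g.keys := (pvMemKeysOfList graph start).mpr hstart
  set V0 := g.keys.foldl (fun d k => d.insert k false) PySem.Dict.empty with hV0d
  set D0 := g.keys.foldl (fun d k => d.insert k (-1 : Int)) PySem.Dict.empty with hD0d
  have hV0f : ∀ x, pvVis V0 x = false := fun x =>
    pvGetDFoldlConst g.keys PySem.Dict.empty false x (by simp [PySem.Dict.getD_empty])
  have hD0f : ∀ x, D0.getD x (-1) = -1 := fun x =>
    pvGetDFoldlConst g.keys PySem.Dict.empty (-1) x (by simp [PySem.Dict.getD_empty])
  have hD0k : D0.keys = g.keys := pvKeysFoldlConst g.keys hnd (-1)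
  have hsize : g.size = g.keys.length := by simp [PySem.Dict.size, PySem.Dict.keys]
  have hD0count : pvDCount g D0 = g.size := by
    unfold pvDCount
    rw [List.countP_eq_length.mpr (fun k _ => by simp [hD0f]), hsize]
  have hvs : V0.getD start false = false := hV0f start
  rw [pvALoop, if_neg (by simp [hvs])]
  by_cases httl : 0 ≤ ttl
  · -- ttl ≥ 0: process start at level 0, then run the simulation
    have hRk : ∀ x ∈ pvReachList graph start, ∀ c ∈ g.getD x [], c ∈ g.keys := by
      intro x hx c hc
      rcases hrest with h | h
      · omega
      · exact (pvMemKeysOfList graph c).mpr (h x hx c (hg ▸ hc))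
    have hRc : ∀ x ∈ pvReachList graph start, ∀ c ∈ g.getD x [],
        c ∈ pvReachList graph start := by
      intro x hx c hc
      exact pvReach_closed graph start x c hx (hg ▸ hc)
    have hsR : start ∈ pvReachList graph start := pvReach_start graph start
    rw [if_neg (by rw [hD0f start]; omega)]
    rw [pvQueueAppend]
    have hm1 : D0.getD start (-1) + 1 = 0 := by rw [hD0f start]; ring
    rw [hm1]
    simp only [List.nil_append]
    set V1 := V0.insert start true with hV1
    set D1 := D0.insert start 0 with hD1
    set children0 := g.getD start [] with hch0
    set new0 := (children0.filter (fun c => !pvVis V1 c)).map (fun c => (start, c)) with hnew0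
    -- B side: first outer step
    have hSU1 : ∀ x, (PySem.Set.add PySem.Set.empty start).contains x = pvVis V1 x := by
      intro x
      rw [pvContains_add, hV1, pvVis_insert, hV0f]
      simp [PySem.Set.empty, PySem.Set.contains]
    obtain ⟨hB2, hB1⟩ := pvChild (pvVis V1) start children0 (PySem.Set.add PySem.Set.empty start)
      (pvVis V1) [] hSU1 (fun _ h => h)
    rw [← hnew0] at hB2 hB1
    set delta0 := (pvFFU new0 (pvVis V1)).map Prod.snd with hdelta0
    set S1 := (children0.foldl pvBChild (PySem.Set.add PySem.Set.empty start, [])).1 with hS1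
    have hpair : children0.foldl pvBChild (PySem.Set.add PySem.Set.empty start, [])
        = (S1, delta0) := by
      rw [hS1]
      conv_lhs => rw [← Prod.mk.eta (p := children0.foldl pvBChild (PySem.Set.add PySem.Set.empty start, []))]
      rw [hB2]
      simp
    have hBstep : pvBOuter g ttl 0 (PySem.Set.add PySem.Set.empty start) [start] 0
        = pvBOuter g ttl 1 S1 delta0 1 := by
      rw [pvBOuter, if_neg (by push_neg; exact ⟨by simp, by omega⟩)]
      simp only [List.foldl_cons, List.foldl_nil, ← hch0, hpair]
      norm_num
    rw [hBstep]
    -- the simulation from the state after the first pop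
    obtain ⟨hkeysF, hcountF⟩ := pvMain g ttl hnd (pvReachList graph start) hRk hRc httl
      (2 * (g.size + (g.values.map List.length).sum) + 1)
      (g.size + (g.values.map List.length).sum)
      V1 D1 (D0.insert start start) new0 [] new0 0 [] delta0 S1 1
      (le_refl _)
      (by -- bound
        unfold pvBound
        have hw := pvWeight_insert g hnd V0 start hstartk (hV0f start)
        rw [← hch0, ← hV1] at hw
        have hwi := pvWeightInit g hnd V0 hV0f
        have hnl : new0.length ≤ children0.length := by
          rw [hnew0, List.length_map]
          exact List.length_filter_le _ _
        omega)
      (by simp)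
      (by intro pc hpc; cases hpc)
      (by intro pc hpc
          rw [hnew0] at hpc
          rcases List.mem_map.mp hpc with ⟨ch, _, rfl⟩
          exact ⟨by rw [hV1, pvVis_insert]; simp, by rw [hD1, PySem.Dict.getD_insert_self]⟩)
      rfl
      (by rw [pvMarks_nil, hdelta0])
      (by intro x; rw [hB1 x]; simp)
      (by intro x hx; cases hx)
      (by intro x hx
          rw [hdelta0] at hx
          rcases List.mem_map.mp hx with ⟨pc, hpc, rfl⟩
          have := pvFFU_subset _ _ _ hpc
          rw [hnew0] at this
          rcases List.mem_map.mp this with ⟨ch, hch, rfl⟩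
          exact ⟨hRk start hsR ch (List.mem_of_mem_filter hch),
            hRc start hsR ch (List.mem_of_mem_filter hch)⟩)
      (by intro x
          by_cases hxs : x = start
          · subst hxs
            rw [hV1, hD1, pvVis_insert, PySem.Dict.getD_insert_self]
            simp
          · rw [hV1, hD1, pvVis_insert, PySem.Dict.getD_insert_of_ne _ _ _ hxs, hV0f, hD0f]
            simp [hxs])
      (by rw [hD1, PySem.Dict.keys_insert_of_contains _ _
            ((PySem.Dict.contains_iff_mem_keys D0 start).mpr (hD0k ▸ hstartk))]
          exact hD0k)
      (le_refl 0)
      httl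
      (by -- counting
          have := pvDCount_insert g hnd D0 start hstartk (hD0f start) 0 (by omega)
          rw [← hD1] at this
          simp only [List.length_nil, Nat.cast_zero, add_zero]
          omega)
    rw [pvReturnCount g _ hkeysF hnd, hcountF]
    have : pvBResume g ttl 0 S1 [] delta0 1 = pvBOuter g ttl 1 S1 delta0 1 := by
      unfold pvBResume
      simp
    rw [this]
  · -- ttl < 0: A breaks immediately on start; B's loop does not run
    rw [if_pos (by rw [hD0f start]; omega)]
    rw [pvReturnCount g D0 hD0k hnd, hD0count]
    rw [pvBOuter, if_pos (Or.inr (by omega))]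
    ring
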